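-- pv_equiv track=rewrite | github.com/JoaoASouza/RTPhishingDetector | dig_to_csv.py | get_additional
-- ===== SOURCE A (Python) =====
-- def get_additional(content_arr):
--     isCounting = False
--     count = 0
--     for e in content_arr:
--         if ("ADDITIONAL SECTION" in e):
--             isCounting = True
--             continue
--         if (isCounting and len(e) == 0):
--             break
--         if (isCounting):
--             count += 1
--     return count
-- ===== SOURCE B (Python) =====
-- def get_additional(content_arr):
--     start = next((i for i, e in enumerate(content_arr) if "ADDITIONAL SECTION" in e), None)
--     if start is None:
--         return 0
--     tail = content_arr[start + 1:]
--     try: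
--         end = tail.index("")
--     except ValueError:
--         end = len(tail)
--     return len([e for e in tail[:end] if "ADDITIONAL SECTION" not in e])
-- ===== Notes on version B (the rewrite author's own statement) =====
-- stated objective: alternative
-- what changed: Replaces the single-flag state machine (set flag on marker, break on blank, count otherwise) with a locate-boundaries-then-tally decomposition: find the first marker index, slice the tail, find the first empty line to delimit the window, and count the non-marker lines in that window.
import Mathlib
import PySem

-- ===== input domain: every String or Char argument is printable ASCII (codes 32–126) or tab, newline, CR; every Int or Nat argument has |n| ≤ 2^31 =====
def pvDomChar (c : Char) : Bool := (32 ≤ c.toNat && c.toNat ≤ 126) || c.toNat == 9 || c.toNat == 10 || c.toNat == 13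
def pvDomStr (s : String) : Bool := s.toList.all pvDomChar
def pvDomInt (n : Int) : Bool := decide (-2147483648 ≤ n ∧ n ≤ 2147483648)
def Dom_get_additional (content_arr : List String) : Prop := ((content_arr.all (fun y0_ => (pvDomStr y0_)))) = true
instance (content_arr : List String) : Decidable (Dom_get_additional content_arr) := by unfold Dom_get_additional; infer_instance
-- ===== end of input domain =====

-- B replaces A's one-pass flag state machine by locate-the-boundaries-then-tally (alternative decomposition, same cost).

-- ===== PORT A =====
-- the for-loop with its (isCounting, count) state; returning count in the middle is the 'break'
def getAddLoop : List String → Bool → Int → Int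
  | [], _, count => count
  | e :: rest, isCounting, count =>
    if PySem.Str.isIn "ADDITIONAL SECTION" e then
      getAddLoop rest true count
    else if isCounting && (PySem.Str.len e == 0) then
      count
    else if isCounting then
      getAddLoop rest isCounting (count + 1)
    else
      getAddLoop rest isCounting count

def get_additional (content_arr : List String) : Int :=
  getAddLoop content_arr false 0

-- ===== PORT B =====
def get_additional_alt (content_arr : List String) : Int :=
  match content_arr.findIdx? (fun e => PySem.Str.isIn "ADDITIONAL SECTION" e) with
  | none => 0
  | some start =>
    let tail := content_arr.drop (start + 1)  -- content_arr[start+1:], exact since start ≥ 0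
    let stop := (PySem.List.index? tail "").getD tail.length  -- tail.index("") with len(tail) on ValueError
    (((tail.take stop).filter (fun e => !(PySem.Str.isIn "ADDITIONAL SECTION" e))).length : Int)

-- ===== PRECONDITION & SPEC =====
def Spec_get_additional (content_arr : List String) (out : Int) : Prop := out = get_additional_alt content_arr
instance (content_arr : List String) (out : Int) : Decidable (Spec_get_additional content_arr out) := by unfold Spec_get_additional; infer_instance

-- ===== CLAIM (what is proved, stated in full; the proofs are below) =====
def Claim_equal_get_additional : Prop := ∀ (content_arr : List String), Dom_get_additional content_arr → Spec_get_additional content_arr (get_additional content_arr)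

-- ===== LEMMAS AND PROOFS =====

-- the value B computes from the lines after the marker
def countSect (t : List String) : Int :=
  (((t.take ((PySem.List.index? t "").getD t.length)).filter
      (fun e => !(PySem.Str.isIn "ADDITIONAL SECTION" e))).length : Int)

lemma isIn_empty_false : PySem.Str.isIn "ADDITIONAL SECTION" "" = false := by decide

lemma loop_cons_marker (e : String) (t : List String) (b : Bool) (c : Int)
    (h : PySem.Str.isIn "ADDITIONAL SECTION" e = true) :
    getAddLoop (e :: t) b c = getAddLoop t true c := by
  simp only [getAddLoop, h, if_true]

lemma loop_cons_skip (e : String) (t : List String) (c : Int)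
    (h : PySem.Str.isIn "ADDITIONAL SECTION" e = false) :
    getAddLoop (e :: t) false c = getAddLoop t false c := by
  simp only [getAddLoop, h, Bool.false_and, Bool.false_eq_true, if_false]

lemma loop_cons_count (e : String) (t : List String) (c : Int)
    (hm : PySem.Str.isIn "ADDITIONAL SECTION" e = false) (hz : e ≠ "") :
    getAddLoop (e :: t) true c = getAddLoop t true (c + 1) := by
  have hlen : (PySem.Str.len e == 0) = false := by
    simp only [PySem.Str.len_eq, beq_eq_false_iff_ne, ne_eq, Nat.cast_eq_zero,
      List.length_eq_zero_iff]
    intro h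
    exact hz (String.ext (by simpa using h))
  simp only [getAddLoop, hm, Bool.false_eq_true, if_false, Bool.true_and, hlen, if_true]

lemma stop_cons (e : String) (t : List String) (h : e ≠ "") :
    ((PySem.List.index? (e :: t) "").getD (e :: t).length)
      = ((PySem.List.index? t "").getD t.length) + 1 := by
  rw [PySem.List.index?_cons_of_ne t h]
  cases PySem.List.index? t "" <;> simp

lemma countSect_cons (e : String) (t : List String) (h : e ≠ "") :
    countSect (e :: t)
      = (if PySem.Str.isIn "ADDITIONAL SECTION" e then 0 else 1) + countSect t := by
  unfold countSect
  rw [stop_cons e t h, List.take_succ_cons, List.filter_cons]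
  by_cases hm : PySem.Str.isIn "ADDITIONAL SECTION" e
  · simp only [hm, Bool.not_true, Bool.false_eq_true, if_false, if_true]
    ring
  · have hb : (!PySem.Str.isIn "ADDITIONAL SECTION" e) = true := by
      rw [eq_false_of_ne_true hm]; rfl
    rw [if_pos hb, if_neg hm, List.length_cons]
    push_cast
    ring

lemma getAddLoop_true (t : List String) (count : Int) :
    getAddLoop t true count = count + countSect t := by
  induction t generalizing count with
  | nil => simp [getAddLoop, countSect]
  | cons e rest ih =>
    by_cases hm : PySem.Str.isIn "ADDITIONAL SECTION" e
    · have hne : e ≠ "" := by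
        intro h; rw [h, isIn_empty_false] at hm; exact Bool.noConfusion hm
      rw [loop_cons_marker e rest true count hm, ih, countSect_cons e rest hne, if_pos hm]
      ring
    · by_cases hz : e = ""
      · subst hz
        have h1 : getAddLoop ("" :: rest) true count = count := rfl
        have h2 : countSect ("" :: rest) = 0 := by
          unfold countSect
          rw [PySem.List.index?_cons_self "" rest]
          simp
        rw [h1, h2]; ring
      · rw [loop_cons_count e rest count (eq_false_of_ne_true hm) hz, ih,
            countSect_cons e rest hz, if_neg hm]
        ring

lemma getAddLoop_false (arr : List String) :
    getAddLoop arr false 0 = get_additional_alt arr := by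
  induction arr with
  | nil => rfl
  | cons e rest ih =>
    by_cases hm : PySem.Str.isIn "ADDITIONAL SECTION" e
    · rw [loop_cons_marker e rest false 0 hm, getAddLoop_true rest 0]
      unfold get_additional_alt
      rw [List.findIdx?_cons]
      simp only [hm, List.drop_succ_cons, zero_add]
      rfl
    · rw [loop_cons_skip e rest 0 (eq_false_of_ne_true hm), ih]
      unfold get_additional_alt
      rw [List.findIdx?_cons]
      simp only [eq_false_of_ne_true hm]
      cases hfi : List.findIdx? (fun e => PySem.Str.isIn "ADDITIONAL SECTION" e) rest with
      | none => rfl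
      | some i => simp only [Option.map_some, Bool.false_eq_true, if_false, List.drop_succ_cons]

-- ===== VERDICT (by name: the statement is the Claim_ definition above) =====
theorem get_additional_spec : Claim_equal_get_additional := by
  intro arr _
  unfold Spec_get_additional get_additional
  exact getAddLoop_false arr
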